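-- pv_equiv track=rewrite | github.com/yehorlevchenko/hillel_python_01 | tasks_01.py | idiotic_str
-- ===== SOURCE A (Python) =====
-- def idiotic_str(input_str):
--     """
--     Вернуть полученную строку, сделав каждую вторую букву заглавной:
--     Пример: тестовая строка -> тЕсТоВаЯ СтРоКа
--     """
--     # my code here
--     idiotic_str = ''
--     i = True
--     for char in input_str:
--         if i:
--             idiotic_str += char.lower()
--             i = False
--         else:
--             idiotic_str += char.upper()
--             i = True
--     return idiotic_str
-- ===== SOURCE B (Python) =====
-- def idiotic_str(input_str):
--     # Process the string in two-character chunks: lowercase the chunk's first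
--     # character, uppercase its second (if any). No per-character case toggle.
--     out = []
--     i = 0
--     n = len(input_str)
--     while i < n:
--         pair = input_str[i:i+2]
--         out.append(pair[:1].lower() + pair[1:].upper())
--         i += 2
--     return ''.join(out)
-- ===== Notes on version B (the rewrite author's own statement) =====
-- stated objective: alternative
-- what changed: Replaces A's per-character boolean-toggle accumulation with a loop over two-character chunks that lowercases each chunk's first character and uppercases its second, joining the chunks at the end.
import Mathlib
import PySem

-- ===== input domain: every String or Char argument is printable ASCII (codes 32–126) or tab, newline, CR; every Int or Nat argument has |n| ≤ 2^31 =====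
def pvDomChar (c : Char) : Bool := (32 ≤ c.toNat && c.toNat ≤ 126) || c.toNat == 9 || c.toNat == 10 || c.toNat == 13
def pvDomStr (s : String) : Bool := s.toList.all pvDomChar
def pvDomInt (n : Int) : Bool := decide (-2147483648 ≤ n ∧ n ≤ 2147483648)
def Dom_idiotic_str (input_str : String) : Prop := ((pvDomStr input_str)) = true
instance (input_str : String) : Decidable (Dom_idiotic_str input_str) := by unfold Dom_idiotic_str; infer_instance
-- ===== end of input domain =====

-- B processes two-character chunks (lower the first, upper the second) instead of A's per-character boolean-toggle loop; alternative decomposition, equal value.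

-- ===== PORT A =====
def idiotic_str (input_str : String) : String :=
  -- literal port of A: accumulate characters, toggling a boolean flag
  let r := input_str.toList.foldl
    (fun (st : List Char × Bool) c =>
      if st.2 then (st.1 ++ [PySem.Chars.lowerChar c], false)
      else (st.1 ++ [PySem.Chars.upperChar c], true))
    ([], true)
  String.ofList r.1

-- ===== PORT B =====
-- the while loop: 'while i < n: pair = s[i:i+2]; out.append(pair[:1].lower() + pair[1:].upper()); i += 2'
def idiotic_str_alt_loop (cs : List Char) (n : Int) (i : Int) (out : List (List Char)) :
    List (List Char) :=
  if i < n then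
    let pair := PySem.List.slice cs (some i) (some (i + 2))
    idiotic_str_alt_loop cs n (i + 2)
      (out ++ [PySem.Chars.lower (PySem.List.slice pair none (some 1)) ++
               PySem.Chars.upper (PySem.List.slice pair (some 1) none)])
  else out
termination_by (n - i).toNat
decreasing_by omega

def idiotic_str_alt (input_str : String) : String :=
  -- ''.join(out) is concatenation of the chunks, exact
  String.ofList
    (idiotic_str_alt_loop input_str.toList (PySem.Str.len input_str) 0 []).flatten

-- ===== PRECONDITION & SPEC =====
def Spec_idiotic_str (input_str : String) (out : String) : Prop := out = idiotic_str_alt input_str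
instance (input_str : String) (out : String) : Decidable (Spec_idiotic_str input_str out) := by unfold Spec_idiotic_str; infer_instance

-- ===== CLAIM (what is proved, stated in full; the proofs are below) =====
def Claim_equal_idiotic_str : Prop := ∀ (input_str : String), Dom_idiotic_str input_str → Spec_idiotic_str input_str (idiotic_str input_str)

-- ===== LEMMAS AND PROOFS =====

-- the alternating-case list, parameterised by the starting flag (true = lowercase next)
def altCase : Bool → List Char → List Char
  | _, [] => []
  | b, c :: t => (if b then PySem.Chars.lowerChar c else PySem.Chars.upperChar c) :: altCase (!b) t

-- the same list, built two characters at a time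
def pairCase : List Char → List Char
  | [] => []
  | [a] => [PySem.Chars.lowerChar a]
  | a :: b :: t => PySem.Chars.lowerChar a :: PySem.Chars.upperChar b :: pairCase t

theorem pairCase_eq_altCase (cs : List Char) : pairCase cs = altCase true cs := by
  induction cs using pairCase.induct with
  | case1 => rfl
  | case2 a => rfl
  | case3 a b t ih => simp [pairCase, altCase, ih]

-- A's loop computes acc ++ altCase b cs
theorem portA_loop (cs : List Char) (acc : List Char) (b : Bool) :
    (cs.foldl (fun (st : List Char × Bool) c =>
      if st.2 then (st.1 ++ [PySem.Chars.lowerChar c], false)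
      else (st.1 ++ [PySem.Chars.upperChar c], true)) (acc, b)).1
      = acc ++ altCase b cs := by
  induction cs generalizing acc b with
  | nil => simp [altCase]
  | cons c t ih => cases b <;> simp [altCase, ih]

-- B's loop, started at a natural index, appends pairCase of the rest
theorem portB_loop (cs : List Char) (k : Nat) (out : List (List Char)) :
    (idiotic_str_alt_loop cs (cs.length : Int) (k : Int) out).flatten
      = out.flatten ++ pairCase (cs.drop k) := by
  rw [idiotic_str_alt_loop]
  split_ifs with h
  · have hk : k < cs.length := by exact_mod_cast h
    have h2 : ((k : Int) + 2) = ((k + 2 : Nat) : Int) := by push_cast; ring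
    have hpair : PySem.List.slice cs (some (k : Int)) (some ((k : Int) + 2))
        = (cs.drop k).take 2 := by
      rw [h2, PySem.List.slice_natCast]; congr 1; omega
    have hrec := portB_loop cs (k + 2)
      (out ++ [PySem.Chars.lower (PySem.List.slice ((cs.drop k).take 2) none (some 1)) ++
               PySem.Chars.upper (PySem.List.slice ((cs.drop k).take 2) (some 1) none)])
    rw [hpair, h2, hrec]
    -- identify the chunk with the head of pairCase
    have hdrop : cs.drop (k + 2) = (cs.drop k).drop 2 := by
      rw [List.drop_drop]
    obtain ⟨a, rest, hd⟩ : ∃ a rest, cs.drop k = a :: rest := by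
      cases hcs : cs.drop k with
      | nil => exfalso; have := List.length_drop (l := cs) (i := k); rw [hcs] at this; simp at this; omega
      | cons a rest => exact ⟨a, rest, rfl⟩
    cases rest with
    | nil =>
      simp [hd, hdrop, pairCase, PySem.List.slice, PySem.Chars.lower, PySem.Chars.upper,
        PySem.List.clampIdx]
    | cons b t =>
      simp [hd, hdrop, pairCase, PySem.Chars.lower, PySem.Chars.upper,
        PySem.List.slice, PySem.List.clampIdx]
  · have hk : cs.length ≤ k := by omega
    simp [List.drop_eq_nil_of_le hk, pairCase]
termination_by cs.length - k

-- ===== VERDICT (by name: the statement is the Claim_ definition above) =====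
theorem idiotic_str_spec : Claim_equal_idiotic_str := by
  intro s _
  unfold Spec_idiotic_str idiotic_str idiotic_str_alt
  have hA := portA_loop s.toList [] true
  simp only [hA, List.nil_append]
  have hlen : PySem.Str.len s = (s.toList.length : Int) := by simp [pysem]
  have hB := portB_loop s.toList 0 []
  simp only [Nat.cast_zero] at hB
  rw [hlen, hB]
  simp [pairCase_eq_altCase]
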